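-- pv_equiv track=rewrite | github.com/Miaosheng1/nerfacto_bbx_sampling | scripts/debugRay.py | search_Camera_index
-- ===== SOURCE A (Python) =====
-- def search_Camera_index(train_names,test_list):
--     train_idx =[]
--     test_idx = []
--     for name in train_names:
--         name = str(name).split('/')[-1][:-4]
--         train_idx.append(name)
--     for name in test_list:
--         name = str(name).split('/')[-1][:-4]
--         test_idx.append(name)
--     result = []
--     i = 0
--     for element in test_idx:
--         while i < len(train_idx) and train_idx[i] < element:
--             i += 1
--         result.append(i)
--
--     return result
-- ===== SOURCE B (Python) =====
-- def search_Camera_index(train_names, test_list):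
--     def stem(name):
--         return str(name).split('/')[-1][:-4]
--     train = [stem(x) for x in train_names]
--     tests = [stem(x) for x in test_list]
--     out = []
--     k = 0
--     for j, t in enumerate(train):
--         while k < len(tests) and tests[k] <= t:
--             out.append(j)
--             k += 1
--     out += [len(train)] * (len(tests) - k)
--     return out
-- ===== Notes on version B (the rewrite author's own statement) =====
-- stated objective: alternative
-- what changed: Replaces A's per-test-element loop with an inner pointer-advance while over the train names by a single inverted merge: one pass over the train names that emits the current train index for each still-pending test name whose threshold is reached, then pads the remaining test names with len(train).
import Mathlib
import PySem

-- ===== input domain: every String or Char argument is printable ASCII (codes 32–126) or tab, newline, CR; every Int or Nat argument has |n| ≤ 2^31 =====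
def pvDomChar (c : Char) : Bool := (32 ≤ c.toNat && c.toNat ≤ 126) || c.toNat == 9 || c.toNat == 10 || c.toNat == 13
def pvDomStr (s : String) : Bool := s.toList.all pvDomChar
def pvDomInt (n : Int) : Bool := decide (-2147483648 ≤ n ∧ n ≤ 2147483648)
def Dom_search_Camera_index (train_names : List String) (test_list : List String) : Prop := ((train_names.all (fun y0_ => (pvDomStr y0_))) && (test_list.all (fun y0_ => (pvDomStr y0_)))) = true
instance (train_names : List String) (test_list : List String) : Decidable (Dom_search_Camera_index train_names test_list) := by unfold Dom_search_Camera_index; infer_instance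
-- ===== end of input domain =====

-- B inverts A's merge: one pass over the train names emitting pointer positions for the
-- test names as the threshold is passed, instead of a per-test-name inner advance loop
-- (alternative decomposition, same linear cost).


-- ===== PORT A =====
-- str(name).split('/')[-1][:-4]  (split('/') is never empty, so the [-1] lookup cannot fail;
-- shared by both ports because both Pythons contain this exact expression)
def pvStem (s : String) : String :=
  PySem.Str.slice (PySem.List.pyGetD ((PySem.Str.split? s "/").getD []) (-1) "") none (some (-4))

-- the inner 'while i < len(train_idx) and train_idx[i] < element: i += 1'
def pvAdvA (train : List String) (e : String) (i : Nat) : Nat :=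
  if i < train.length ∧ PySem.List.pyGetD train (i : Int) "" < e then pvAdvA train e (i + 1) else i
termination_by train.length - i
decreasing_by omega

-- 'for element in test_idx: … ; result.append(i)'
def pvLoopA (train : List String) (tests : List String) (i : Nat) : List Int :=
  match tests with
  | [] => []
  | e :: rest => let j := pvAdvA train e i; (j : Int) :: pvLoopA train rest j

def search_Camera_index (train_names : List String) (test_list : List String) : List Int :=
  pvLoopA (train_names.map pvStem) (test_list.map pvStem) 0

-- ===== PORT B =====
-- 'for j, t in enumerate(train): while k < len(tests) and tests[k] <= t: out.append(j); k += 1'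
-- followed by 'out += [len(train)] * (len(tests) - k)': one merge over both lists,
-- train carrying its current index j, tests as the still-unanswered suffix.
def pvMergeB (train : List String) (tests : List String) (j : Nat) (n : Nat) : List Int :=
  match train, tests with
  | _, [] => []
  | [], _ :: rest => (n : Int) :: pvMergeB [] rest j n
  | t :: tr, e :: rest =>
      if e ≤ t then (j : Int) :: pvMergeB (t :: tr) rest j n
      else pvMergeB tr (e :: rest) (j + 1) n
termination_by train.length + tests.length

def search_Camera_index_alt (train_names : List String) (test_list : List String) : List Int :=
  let train := train_names.map pvStem
  let tests := test_list.map pvStem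
  pvMergeB train tests 0 train.length

-- ===== PRECONDITION & SPEC =====
def Spec_search_Camera_index (train_names : List String) (test_list : List String) (out : List Int) : Prop := out = search_Camera_index_alt train_names test_list
instance (train_names : List String) (test_list : List String) (out : List Int) : Decidable (Spec_search_Camera_index train_names test_list out) := by unfold Spec_search_Camera_index; infer_instance

-- ===== CLAIM (what is proved, stated in full; the proofs are below) =====
def Claim_equal_search_Camera_index : Prop := ∀ (train_names : List String) (test_list : List String), Dom_search_Camera_index train_names test_list → Spec_search_Camera_index train_names test_list (search_Camera_index train_names test_list)

-- ===== LEMMAS AND PROOFS =====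

theorem pvAdvA_le (train : List String) (e : String) (i : Nat) (h : i ≤ train.length) :
    i ≤ pvAdvA train e i ∧ pvAdvA train e i ≤ train.length := by
  fun_induction pvAdvA train e i with
  | case1 i hc ih => have := ih (by omega); omega
  | case2 i hc => omega

-- one step of A's pointer advance = the train-consuming steps of B's merge
theorem pvMergeB_step (train : List String) (e : String) (rest : List String) (i : Nat)
    (h : i ≤ train.length) :
    pvMergeB (train.drop i) (e :: rest) i train.length
      = (pvAdvA train e i : Int)
          :: pvMergeB (train.drop (pvAdvA train e i)) rest (pvAdvA train e i) train.length := by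
  fun_induction pvAdvA train e i with
  | case1 i hc ih =>
      obtain ⟨hi, hlt⟩ := hc
      have hdrop : train.drop i = train[i] :: train.drop (i + 1) :=
        List.drop_eq_getElem_cons hi
      have hget : PySem.List.pyGetD train (i : Int) "" = train[i] := by
        simp [PySem.List.pyGetD_natCast, List.getD_eq_getElem?_getD, hi]
      rw [hdrop, pvMergeB]
      have hnle : ¬ e ≤ train[i] := by
        rw [hget] at hlt; exact not_le.mpr hlt
      rw [if_neg hnle]
      exact ih (by omega)
  | case2 i hc =>
      rcases Nat.lt_or_ge i train.length with hi | hi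
      · have hdrop : train.drop i = train[i] :: train.drop (i + 1) :=
          List.drop_eq_getElem_cons hi
        have hget : PySem.List.pyGetD train (i : Int) "" = train[i] := by
          simp [PySem.List.pyGetD_natCast, List.getD_eq_getElem?_getD, hi]
        have hle : e ≤ train[i] := by
          by_contra hne
          exact hc ⟨hi, by rw [hget]; exact not_le.mp hne⟩
        rw [hdrop, pvMergeB, if_pos hle, ← hdrop]
      · have hin : i = train.length := by omega
        subst hin
        simp [List.drop_length, pvMergeB]
        

theorem pvLoopA_eq_pvMergeB (train : List String) (tests : List String) (i : Nat)
    (h : i ≤ train.length) :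
    pvLoopA train tests i = pvMergeB (train.drop i) tests i train.length := by
  induction tests generalizing i with
  | nil =>
      simp only [pvLoopA]
      generalize train.drop i = d
      cases d <;> simp [pvMergeB]
  | cons e rest ih =>
      rw [pvLoopA, pvMergeB_step train e rest i h]
      have hb := pvAdvA_le train e i h
      rw [ih (pvAdvA train e i) hb.2]

-- ===== VERDICT (by name: the statement is the Claim_ definition above) =====
theorem search_Camera_index_spec : Claim_equal_search_Camera_index := by
  intro train_names test_list _
  unfold Spec_search_Camera_index search_Camera_index search_Camera_index_alt
  rw [pvLoopA_eq_pvMergeB _ _ 0 (Nat.zero_le _), List.drop_zero]
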